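-- pv_equiv track=rewrite | github.com/MatiasDonati/Programacion_I | Desafios Starks/funciones_5.py | calcular_cantidad_tipo
-- ===== SOURCE A (Python) =====
-- def capitalizar_palabras(palabra_o_palabras:str):
--
--     separadas = palabra_o_palabras.split()
--
--     for indice in range(len(separadas)):
--         separadas[indice] = separadas[indice].capitalize()
--
--     unir_palabras_lista = ' '.join(separadas)
--
--     return unir_palabras_lista
--
-- def calcular_cantidad_tipo(lista:list, clave:str):
--     if len(lista) == 0:
--         return {"Error": "La lista se encuentra vacía"}
--
--     diccionario_gral = {}
--
--     for heroe in lista: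
--         tipo_clave = capitalizar_palabras(heroe[clave])
--         if tipo_clave in diccionario_gral:
--             diccionario_gral[tipo_clave] += 1
--         else:
--             diccionario_gral[tipo_clave] = 1
--
--     return diccionario_gral
-- ===== SOURCE B (Python) =====
-- def calcular_cantidad_tipo(lista: list, clave: str):
--     if len(lista) == 0:
--         return {"Error": "La lista se encuentra vacía"}
--     resultado = {}
--     pendientes = [' '.join(w.capitalize() for w in heroe[clave].split()) for heroe in lista]
--     while pendientes:
--         actual = pendientes[0]
--         restantes = [x for x in pendientes if x != actual]
--         resultado[actual] = len(pendientes) - len(restantes)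
--         pendientes = restantes
--     return resultado
-- ===== Notes on version B (the rewrite author's own statement) =====
-- stated objective: alternative
-- what changed: replaces A's single-pass incremental dict counting (membership test + increment per hero) with a repeated-partition loop: take the first pending key, filter it out of the pending list, and record the count as the difference of list lengths, iterating until the pending list is empty
import Mathlib
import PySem

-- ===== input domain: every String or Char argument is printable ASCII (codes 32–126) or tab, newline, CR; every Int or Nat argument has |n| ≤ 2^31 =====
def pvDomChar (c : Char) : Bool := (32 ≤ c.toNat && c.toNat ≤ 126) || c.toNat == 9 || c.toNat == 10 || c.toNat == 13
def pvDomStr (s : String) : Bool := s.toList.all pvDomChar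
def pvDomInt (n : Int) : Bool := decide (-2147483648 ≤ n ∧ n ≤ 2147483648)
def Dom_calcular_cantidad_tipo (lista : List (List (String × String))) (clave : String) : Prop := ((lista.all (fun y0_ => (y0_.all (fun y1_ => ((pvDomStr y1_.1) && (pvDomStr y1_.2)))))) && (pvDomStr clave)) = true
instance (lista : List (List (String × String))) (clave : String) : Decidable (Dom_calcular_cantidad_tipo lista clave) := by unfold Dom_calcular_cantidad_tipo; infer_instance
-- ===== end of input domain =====

-- B replaces A's incremental if/else dict-counting loop by a repeated-partition loop (peel the first pending key, filter it out, count = difference of lengths); same result, alternative decomposition (not faster).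


-- ===== PORT A =====
-- str.capitalize(): first char uppercased, rest lowercased (exact on ASCII); used by both ports
def pyCapitalize (s : String) : String :=
  match s.toList with
  | [] => ""
  | c :: cs => String.ofList (PySem.Chars.upperChar c :: PySem.Chars.lower cs)

-- the 'for indice in range(len(separadas)): separadas[indice] = ….capitalize()' loop
def capLoop : List String → List String
  | [] => []
  | w :: ws => pyCapitalize w :: capLoop ws

def capitalizar_palabras (s : String) : String :=
  let separadas := PySem.Str.split₀ s
  let separadas := capLoop separadas
  PySem.Str.join " " separadas

-- the empty-list branch returns {"Error": <str>}, not a str→int dict: it has no value of the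
-- return type, so Pre_ excludes it and the branch is ported as [].
-- heroe[clave]: Pre_ guarantees the key is present, so getD's default is never used.
def calcular_cantidad_tipo (lista : List (List (String × String))) (clave : String) : List (String × Int) :=
  if lista.length = 0 then []
  else
    (lista.foldl (fun d heroe =>
      let tipo_clave := capitalizar_palabras ((PySem.Dict.ofList heroe).getD clave "")
      if d.contains tipo_clave then d.insert tipo_clave (d.getD tipo_clave 0 + 1)
      else d.insert tipo_clave 1) PySem.Dict.empty).items

-- ===== PORT B =====
-- Source B's while loop: peel pendientes[0], filter it out, count = len(pendientes) - len(restantes)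
def partLoop : List String → PySem.Dict String Int → PySem.Dict String Int
  | [], resultado => resultado
  | actual :: resto, resultado =>
    let restantes := (actual :: resto).filter (fun x => !(x == actual))
    partLoop restantes (resultado.insert actual (((actual :: resto).length : Int) - restantes.length))
termination_by pendientes _ => pendientes.length
decreasing_by
  simp only [List.filter_cons, beq_self_eq_true, Bool.not_true, List.length_cons]
  exact Nat.lt_succ_of_le (List.length_filter_le _ _)

def calcular_cantidad_tipo_alt (lista : List (List (String × String))) (clave : String) : List (String × Int) :=
  if lista.length = 0 then []
  else
    let pendientes := lista.map (fun heroe =>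
      PySem.Str.join " " ((PySem.Str.split₀ ((PySem.Dict.ofList heroe).getD clave "")).map pyCapitalize))
    (partLoop pendientes PySem.Dict.empty).items

-- ===== PRECONDITION & SPEC =====
-- Pre_ excludes the empty list, where A returns {"Error": <string>} — a str→str dict with no value
-- of the declared str→int return type — and heroes lacking clave, where A raises KeyError.
def Pre_calcular_cantidad_tipo (lista : List (List (String × String))) (clave : String) : Prop :=
  lista ≠ [] ∧ lista.all (fun heroe => (PySem.Dict.ofList heroe).contains clave) = true
instance (lista : List (List (String × String))) (clave : String) : Decidable (Pre_calcular_cantidad_tipo lista clave) := by unfold Pre_calcular_cantidad_tipo; infer_instance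

def pvWitness_calcular_cantidad_tipo : (List (List (String × String))) × String :=
  ([[("tipo", "super   HERO")], [("tipo", "super hero")], [("tipo", "villano")]], "tipo")

def Spec_calcular_cantidad_tipo (lista : List (List (String × String))) (clave : String) (out : List (String × Int)) : Prop := out = calcular_cantidad_tipo_alt lista clave
instance (lista : List (List (String × String))) (clave : String) (out : List (String × Int)) : Decidable (Spec_calcular_cantidad_tipo lista clave out) := by unfold Spec_calcular_cantidad_tipo; infer_instance

-- ===== CLAIM (what is proved, stated in full; the proofs are below) =====
def Claim_equal_calcular_cantidad_tipo : Prop := ∀ (lista : List (List (String × String))) (clave : String), Dom_calcular_cantidad_tipo lista clave → Pre_calcular_cantidad_tipo lista clave → Spec_calcular_cantidad_tipo lista clave (calcular_cantidad_tipo lista clave)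

-- ===== LEMMAS AND PROOFS =====
theorem capLoop_eq_map (ws : List String) : capLoop ws = ws.map pyCapitalize := by
  induction ws with
  | nil => rfl
  | cons w ws ih => simp [capLoop, ih]

theorem key_eq (heroe : List (String × String)) (clave : String) :
    capitalizar_palabras ((PySem.Dict.ofList heroe).getD clave "")
      = PySem.Str.join " " ((PySem.Str.split₀ ((PySem.Dict.ofList heroe).getD clave "")).map pyCapitalize) := by
  simp [capitalizar_palabras, capLoop_eq_map]

theorem step_eq (d : PySem.Dict String Int) (t : String) :
    (if d.contains t then d.insert t (d.getD t 0 + 1) else d.insert t 1)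
      = d.insert t (d.getD t 0 + 1) := by
  by_cases hc : d.contains t = true
  · simp [hc]
  · simp only [Bool.not_eq_true] at hc
    rw [if_neg (by simp [hc]), PySem.Dict.getD_of_not_contains (h := hc)]
    norm_num

theorem fold_eq_counter (lista : List (List (String × String))) (clave : String) :
    lista.foldl (fun d heroe =>
      let tipo_clave := capitalizar_palabras ((PySem.Dict.ofList heroe).getD clave "")
      if d.contains tipo_clave then d.insert tipo_clave (d.getD tipo_clave 0 + 1)
      else d.insert tipo_clave 1) PySem.Dict.empty
    = PySem.Dict.counter (lista.map (fun heroe =>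
        PySem.Str.join " " ((PySem.Str.split₀ ((PySem.Dict.ofList heroe).getD clave "")).map pyCapitalize))) := by
  rw [← PySem.Dict.foldl_insert_getD_add_one_eq_counter, List.foldl_map]
  simp only [key_eq, step_eq]

-- A run of Set.add from an accumulator containing k skips every copy of k: the invariant
-- behind peeling one key. s1 ++ [k] ++ s2 is the accumulator with k somewhere inside.
theorem foldl_add_peel (t : List String) (k : String) (s1 s2 : List String)
    (hk2 : k ∉ s2) :
    ∃ u, (t.filter (fun x => !(x == k))).foldl PySem.Set.add (s1 ++ s2) = s1 ++ s2 ++ u ∧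
      t.foldl PySem.Set.add (s1 ++ [k] ++ s2) = s1 ++ [k] ++ s2 ++ u := by
  induction t generalizing s2 with
  | nil => exact ⟨[], by simp⟩
  | cons x xs ih =>
    by_cases hx : x = k
    · have hcond : (!(x == k)) = false := by simp [hx]
      have h1 : PySem.Set.add (s1 ++ [k] ++ s2) x = s1 ++ [k] ++ s2 := by
        simp [PySem.Set.add, PySem.Set.contains, hx]
      simp only [List.filter_cons, hcond, Bool.false_eq_true, if_false, List.foldl_cons, h1]
      exact ih s2 hk2
    · have hcond : (!(x == k)) = true := by simp [hx]
      by_cases hmem : x ∈ s1 ++ s2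
      · have h1 : PySem.Set.add (s1 ++ s2) x = s1 ++ s2 := by
          simp_all [PySem.Set.add, PySem.Set.contains]
        have h2 : PySem.Set.add (s1 ++ [k] ++ s2) x = s1 ++ [k] ++ s2 := by
          rcases List.mem_append.mp hmem with h | h <;> simp_all [PySem.Set.add, PySem.Set.contains]
        simp only [List.filter_cons, hcond, if_true, List.foldl_cons, h1, h2]
        exact ih s2 hk2
      · have h1 : PySem.Set.add (s1 ++ s2) x = s1 ++ (s2 ++ [x]) := by
          simp_all [PySem.Set.add, PySem.Set.contains]
        have h2 : PySem.Set.add (s1 ++ [k] ++ s2) x = s1 ++ [k] ++ (s2 ++ [x]) := by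
          simp_all [PySem.Set.add, PySem.Set.contains]
        simp only [List.filter_cons, hcond, if_true, List.foldl_cons, h1, h2]
        obtain ⟨u, hu1, hu2⟩ := ih (s2 ++ [x]) (by
          simp only [List.mem_append, List.mem_singleton]
          rintro (h | h); exact hk2 h; exact hx h.symm)
        exact ⟨x :: u, by simpa using hu1, by simpa using hu2⟩

theorem ofList_cons_filter (k : String) (t : List String) :
    PySem.Set.ofList (k :: t) = k :: PySem.Set.ofList (t.filter (fun x => !(x == k))) := by
  rw [PySem.Set.ofList_eq_foldl, PySem.Set.ofList_eq_foldl]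
  obtain ⟨u, hu1, hu2⟩ := foldl_add_peel t k [] [] (by simp)
  simp only [List.nil_append, List.append_nil] at hu1 hu2
  simp only [List.foldl_cons]
  rw [show PySem.Set.add ([] : PySem.Set String) k = [k] from rfl]
  rw [hu2, hu1]
  simp

-- length of pendientes = length of restantes + count of the peeled key
theorem length_sub_filter (k : String) (l : List String) :
    ((l.length : Int) - ((l.filter (fun x => !(x == k))).length : Int)) = (l.count k : Int) := by
  have h : (l.filter (fun x => !(x == k))).length + l.count k = l.length := by
    induction l with
    | nil => simp
    | cons a t iht =>
      by_cases ha : a = k <;> simp [ha] <;> omega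
  omega

-- contains after inserting a fresh key
theorem contains_insert_fresh (d : PySem.Dict String Int) (k x : String) (v : Int)
    (hk : d.contains k = false) (hx : d.contains x = false) (hne : x ≠ k) :
    (d.insert k v).contains x = false := by
  have hitems : (d.insert k v).items = d.items ++ [(k, v)] :=
    PySem.Dict.items_insert_of_not_contains d v hk
  rw [PySem.Dict.contains_eq_decide_mem_keys] at hx ⊢
  simp only [PySem.Dict.keys, hitems, List.map_append] at hx ⊢
  simp_all

-- the partition loop produces exactly Counter(pendientes) appended to resultado's items
theorem partLoop_items (pendientes : List String) (resultado : PySem.Dict String Int)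
    (hfresh : ∀ x ∈ pendientes, resultado.contains x = false) :
    (partLoop pendientes resultado).items
      = resultado.items
        ++ (PySem.Set.ofList pendientes).map (fun k => (k, (pendientes.count k : Int))) := by
  induction pendientes, resultado using partLoop.induct with
  | case1 resultado => simp [partLoop, PySem.Set.ofList]
  | case2 actual resto resultado restantes ih =>
    have hact : resultado.contains actual = false := hfresh actual (by simp)
    have hmemr : ∀ x ∈ restantes, x ∈ actual :: resto ∧ x ≠ actual := by
      intro x hxr
      have := List.mem_filter.mp hxr
      exact ⟨this.1, by simpa using this.2⟩
    have hfresh' : ∀ x ∈ restantes,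
        (resultado.insert actual (((actual :: resto).length : Int) - (restantes.length : Int))).contains x = false := by
      intro x hxr
      obtain ⟨hxm, hxne⟩ := hmemr x hxr
      exact contains_insert_fresh _ _ _ _ hact (hfresh x hxm) hxne
    rw [partLoop]
    rw [ih hfresh']
    rw [PySem.Dict.items_insert_of_not_contains (h := hact)]
    have hof : PySem.Set.ofList (actual :: resto) = actual :: PySem.Set.ofList restantes := by
      rw [ofList_cons_filter]
      congr 1
      simp [restantes]
    rw [hof]
    have hcnt : ∀ x ∈ PySem.Set.ofList restantes, restantes.count x = (actual :: resto).count x := by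
      intro x hx
      obtain ⟨_, hxne⟩ := hmemr x (by simpa [PySem.Set.mem_ofList] using hx)
      exact List.count_filter (by simpa using hxne)
    simp only [List.map_cons]
    rw [List.map_congr_left (fun x hx => by rw [hcnt x hx])]
    simp [restantes]
    have h := length_sub_filter actual resto
    omega

-- ===== VERDICT (by name: the statement is the Claim_ definition above) =====
theorem calcular_cantidad_tipo_spec : Claim_equal_calcular_cantidad_tipo := by
  intro lista clave _ hpre
  unfold Spec_calcular_cantidad_tipo calcular_cantidad_tipo calcular_cantidad_tipo_alt
  have hne : ¬ lista.length = 0 := by simpa using hpre.1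
  simp only [hne, if_false]
  rw [fold_eq_counter, PySem.Dict.items_counter,
      partLoop_items _ _ (by intro x _; rfl)]
  simp [PySem.Dict.empty]
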